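-- pv_equiv track=rewrite | github.com/HITESH-235/CP_Club_SST | Sep_11/CodeForces/Subtract_or_Divide.py | helper
-- ===== SOURCE A (Python) =====
-- def helper(n):
--     if n == 1 or n == 2 or n == 3:
--         return (n-1)
--     elif n%2 == 0:
--         count = 1
--         n //= n//2
--         count += helper(n)
--     else:
--         count = 1
--         n -= 1
--         count += helper(n)
--     return count
-- ===== SOURCE B (Python) =====
-- def helper(n):
--     # Closed form: for even n (other than the bases) the step n //= n//2 always yields 2,
--     # so every even n takes 1 more step, every odd n takes 2 more steps.
--     if n == 1:
--         return 0
--     if n == 2: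
--         return 1
--     if n == 3:
--         return 2
--     return 2 if n % 2 == 0 else 3
-- ===== Notes on version B (the rewrite author's own statement) =====
-- stated objective: simpler
-- what changed: Replaced the recursion by a closed form: outside the bases 1/2/3, n//(n//2) is always 2 for even n, so the answer is 2 for even n and 3 for odd n.
-- outside the precondition, e.g. on helper(0): A raises ZeroDivisionError, B returns 2
import Mathlib
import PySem

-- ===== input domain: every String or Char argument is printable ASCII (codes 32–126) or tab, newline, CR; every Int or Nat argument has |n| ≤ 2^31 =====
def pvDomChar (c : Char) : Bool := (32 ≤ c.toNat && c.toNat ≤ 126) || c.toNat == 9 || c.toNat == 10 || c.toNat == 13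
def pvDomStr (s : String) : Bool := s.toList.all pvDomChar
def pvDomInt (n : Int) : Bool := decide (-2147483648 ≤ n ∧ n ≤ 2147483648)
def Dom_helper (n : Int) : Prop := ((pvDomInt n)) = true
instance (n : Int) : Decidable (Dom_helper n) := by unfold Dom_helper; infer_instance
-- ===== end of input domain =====

-- B replaces A's recursion by a closed-form branch table (simpler; same result on every n ≠ 0).

-- ===== PORT A =====
-- A is recursive; ported with a fuel parameter to make the recursion total.
-- On every n ≠ 0 the recursion depth is at most 2, so fuel 3 reproduces A exactly there.
def helperFuel : Nat → Int → Int
  | 0, _ => 0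
  | fuel + 1, n =>
    if n = 1 ∨ n = 2 ∨ n = 3 then n - 1
    else if PySem.Int.mod n 2 = 0 then
      1 + helperFuel fuel (PySem.Int.floordiv n (PySem.Int.floordiv n 2))
    else
      1 + helperFuel fuel (n - 1)

def helper (n : Int) : Int := helperFuel 3 n

-- ===== PORT B =====
def helper_alt (n : Int) : Int :=
  if n = 1 then 0
  else if n = 2 then 1
  else if n = 3 then 2
  else if PySem.Int.mod n 2 = 0 then 2 else 3

-- ===== PRECONDITION & SPEC =====
-- Pre_ excludes only n = 0, where A raises ZeroDivisionError (n // (n//2) with n//2 = 0).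
def Pre_helper (n : Int) : Prop := n ≠ 0
instance (n : Int) : Decidable (Pre_helper n) := by unfold Pre_helper; infer_instance
def pvWitness_helper : Int := 10

def Spec_helper (n : Int) (out : Int) : Prop := out = helper_alt n
instance (n : Int) (out : Int) : Decidable (Spec_helper n out) := by unfold Spec_helper; infer_instance

-- ===== CLAIM (what is proved, stated in full; the proofs are below) =====
def Claim_equal_helper : Prop := ∀ (n : Int), Dom_helper n → Pre_helper n → Spec_helper n (helper n)

-- ===== LEMMAS AND PROOFS =====

-- Python's n % 2 == 0 is exact divisibility by 2.
theorem mod_two_eq_zero_iff (n : Int) : PySem.Int.mod n 2 = 0 ↔ 2 ∣ n := by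
  rw [PySem.Int.mod_eq_emod_of_pos (by norm_num)]
  omega

-- For even n ≠ 0, the Python step n //= n//2 always yields 2.
theorem floordiv_half (n : Int) (hn : n ≠ 0) (h : 2 ∣ n) :
    PySem.Int.floordiv n (PySem.Int.floordiv n 2) = 2 := by
  obtain ⟨k, rfl⟩ := h
  have hk : k ≠ 0 := by rintro rfl; simp at hn
  have h1 : PySem.Int.floordiv (2 * k) 2 = k := by
    rw [PySem.Int.floordiv_eq_ediv_of_pos (by norm_num)]
    omega
  rw [h1]
  rcases lt_or_gt_of_ne hk with hneg | hpos
  · have := PySem.Int.floordiv_neg_neg (2 * k) k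
    rw [PySem.Int.floordiv_eq_ediv_of_pos (b := -k) (by omega)] at this
    rw [← this, show -(2 * k) = 2 * (-k) by ring]
    exact Int.mul_ediv_cancel 2 (neg_ne_zero.mpr hk)
  · rw [PySem.Int.floordiv_eq_ediv_of_pos hpos]
    exact Int.mul_ediv_cancel 2 hk

-- ===== VERDICT (by name: the statement is the Claim_ definition above) =====
theorem helper_spec : Claim_equal_helper := by
  intro n _ hn
  unfold Spec_helper helper helper_alt
  by_cases h1 : n = 1
  · simp [helperFuel, h1]
  by_cases h2 : n = 2
  · simp [helperFuel, h2]
  by_cases h3 : n = 3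
  · simp [helperFuel, h3]
  by_cases he : PySem.Int.mod n 2 = 0
  · -- even: one division step reaches 2
    have hdvd := (mod_two_eq_zero_iff n).mp he
    simp only [helperFuel, h1, h2, h3, or_self, if_false, if_neg (by tauto), he, if_pos rfl,
      floordiv_half n hn hdvd]
    simp [helperFuel, h1, h2, h3]
  · -- odd: one subtraction step reaches an even number ≠ 0, ≠ 2
    have hdvd : ¬ (2 ∣ n) := fun h => he ((mod_two_eq_zero_iff n).mpr h)
    have hd' : 2 ∣ (n - 1) := by omega
    have hne : n - 1 ≠ 0 := by omega
    have hmod : PySem.Int.mod (n - 1) 2 = 0 := (mod_two_eq_zero_iff (n - 1)).mpr hd'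
    simp only [helperFuel, if_neg (by tauto), if_neg he,
      if_neg (show ¬(n - 1 = 1 ∨ n - 1 = 2 ∨ n - 1 = 3) by omega), hmod, if_pos rfl,
      floordiv_half (n - 1) hne hd']
    simp [helperFuel, h1, h2, h3]
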